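-- pv_equiv track=rewrite | github.com/smaranjitghose/Foobar_Challenge | Solutions_Python/lovely_lambs.py | solution
-- ===== SOURCE A (Python) =====
-- def calculateSum(n) :
--     if (n <= 0) :
--         return 0
--     if (n == 1) :
--         return 1
--     # fibo=[]
--     fibo =[0] * (n)
--     fibo[0] = 1
--     fibo[1] = 1
--
--     # Initialize result
--     sm = fibo[0] + fibo[1]
--
--     # Add remaining terms
--     for i in range(2,n) :
--         fibo[i] = fibo[i-1] + fibo[i-2]
--         sm = sm + fibo[i]
--
--     return sm
--
-- def solution(l):
--     if l ==0 :
--         return 0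
--     # if l ==
--     ma=0
--     for i in range(0,32):
--         if pow(2,(i+1)) -1 <= l:
--             ma=i
--         else:
--             break
--     ma = ma+1
--     mi =0
--     for i in range(0,100):
--         if calculateSum(i) <= l:
--             mi = i
--         else:
--             break
--     return mi - ma
-- ===== SOURCE B (Python) =====
-- def solution(l):
--     if l == 0:
--         return 0
--     # greedy payout: first henchman gets 1 lamb, each next double the previous,
--     # count how many can be paid with running total (at most 32 henchmen)
--     total, term, greedy = 1, 2, 1
--     while greedy < 32 and total + term <= l:
--         total += term
--         term *= 2
--         greedy += 1
--     # stingy payout: Fibonacci amounts, running sum (at most 99 henchmen)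
--     lucky, fsum, a, b = 0, 0, 1, 1
--     while lucky < 99 and fsum + a <= l:
--         fsum += a
--         lucky += 1
--         a, b = b, a + b
--     return lucky - greedy
-- ===== Notes on version B (the rewrite author's own statement) =====
-- stated objective: simpler
-- what changed: Replaces A's per-index recomputation of the whole Fibonacci prefix sum (calculateSum rebuilt from scratch for every candidate count) and the pow(2,i+1) search by two single accumulating while-loops carrying a running power-of-two total and a running Fibonacci sum.
import Mathlib
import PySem

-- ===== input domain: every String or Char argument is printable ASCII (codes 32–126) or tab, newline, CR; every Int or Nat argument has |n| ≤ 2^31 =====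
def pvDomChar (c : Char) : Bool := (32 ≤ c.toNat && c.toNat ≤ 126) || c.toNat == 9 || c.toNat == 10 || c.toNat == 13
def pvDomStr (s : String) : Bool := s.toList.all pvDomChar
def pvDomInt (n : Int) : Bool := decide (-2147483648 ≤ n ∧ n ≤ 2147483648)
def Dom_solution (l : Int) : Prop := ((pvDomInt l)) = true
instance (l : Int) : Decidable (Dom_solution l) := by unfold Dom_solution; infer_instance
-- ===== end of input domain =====

-- B replaces A's per-index recomputation of the whole Fibonacci prefix sum by two
-- single accumulating loops (running power-of-two total and running Fibonacci sum); simpler.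

-- ===== PORT A =====

-- loop 'for i in range(2,n): fibo[i] = fibo[i-1]+fibo[i-2]; sm += fibo[i]'
-- (indices i, i-1, i-2 are ≥ 0 here, so Nat indexing is exact)
def csLoop (fibo : List Int) (sm : Int) : List Nat → List Int × Int
  | [] => (fibo, sm)
  | i :: rest =>
    let v := fibo.getD (i - 1) 0 + fibo.getD (i - 2) 0
    csLoop (fibo.set i v) (sm + v) rest

def calculateSum (n : Int) : Int :=
  if n ≤ 0 then 0
  else if n = 1 then 1
  else
    let fibo := ((List.replicate n.toNat 0).set 0 1).set 1 1
    -- range(2,n) with n ≥ 2, exact as List.range' 2 (n-2)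
    (csLoop fibo (fibo.getD 0 0 + fibo.getD 1 0) (List.range' 2 (n.toNat - 2))).2

-- 'for i in range(0,32): if pow(2,i+1)-1 <= l: ma = i else: break'
def aGreedy (l : Int) : List Nat → Int → Int
  | [], ma => ma
  | i :: rest, ma => if (2 : Int) ^ (i + 1) - 1 ≤ l then aGreedy l rest (i : Int) else ma

-- 'for i in range(0,100): if calculateSum(i) <= l: mi = i else: break'
def aLucky (l : Int) : List Nat → Int → Int
  | [], mi => mi
  | i :: rest, mi => if calculateSum (i : Int) ≤ l then aLucky l rest (i : Int) else mi

def solution (l : Int) : Int :=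
  if l = 0 then 0
  else
    let ma := aGreedy l (List.range 32) 0 + 1
    let mi := aLucky l (List.range 100) 0
    mi - ma

-- ===== PORT B =====

-- 'while greedy < 32 and total+term <= l: …' (fuel = 32 - greedy)
def bGreedyLoop (l : Int) : Nat → Int → Int → Int → Int
  | 0, _, _, greedy => greedy
  | fuel + 1, total, term, greedy =>
    if total + term ≤ l then bGreedyLoop l fuel (total + term) (term * 2) (greedy + 1)
    else greedy

-- 'while lucky < 99 and fsum+a <= l: …' (fuel = 99 - lucky)
def bLuckyLoop (l : Int) : Nat → Int → Int → Int → Int → Int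
  | 0, _, _, _, lucky => lucky
  | fuel + 1, fsum, a, b, lucky =>
    if fsum + a ≤ l then bLuckyLoop l fuel (fsum + a) b (a + b) (lucky + 1)
    else lucky

def solution_alt (l : Int) : Int :=
  if l = 0 then 0
  else
    let greedy := bGreedyLoop l 31 1 2 1
    let lucky := bLuckyLoop l 99 0 1 1 0
    lucky - greedy

-- ===== PRECONDITION & SPEC =====
def Spec_solution (l : Int) (out : Int) : Prop := out = solution_alt l
instance (l : Int) (out : Int) : Decidable (Spec_solution l out) := by unfold Spec_solution; infer_instance

-- ===== CLAIM (what is proved, stated in full; the proofs are below) =====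
def Claim_equal_solution : Prop := ∀ (l : Int), Dom_solution l → Spec_solution l (solution l)

-- ===== LEMMAS AND PROOFS =====

-- Fibonacci numbers as the Python code generates them: 1, 1, 2, 3, 5, …
def fib : Nat → Int
  | 0 => 1
  | 1 => 1
  | n + 2 => fib (n + 1) + fib n

-- sum of fib j for j ∈ [i, i+k)
def sumFib : Nat → Nat → Int
  | _, 0 => 0
  | i, k + 1 => fib i + sumFib (i + 1) k

-- prefix sum of the first n Fibonacci numbers
def SFib (n : Nat) : Int := sumFib 0 n

theorem csLoop_spec : ∀ (k i : Nat) (fibo : List Int) (sm : Int),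
    2 ≤ i → i + k ≤ fibo.length →
    fibo.getD (i - 1) 0 = fib (i - 1) → fibo.getD (i - 2) 0 = fib (i - 2) →
    (csLoop fibo sm (List.range' i k)).2 = sm + sumFib i k := by
  intro k
  induction k with
  | zero => intro i fibo sm _ _ _ _; simp [csLoop, sumFib]
  | succ k ih =>
    intro i fibo sm h2 hlen h1 h0
    have hi : i < fibo.length := by omega
    have hv : fibo.getD (i - 1) 0 + fibo.getD (i - 2) 0 = fib i := by
      rw [h1, h0]
      obtain ⟨j, rfl⟩ : ∃ j, i = j + 2 := ⟨i - 2, by omega⟩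
      simp [fib]
    rw [List.range'_succ, csLoop, hv]
    rw [ih (i + 1) (fibo.set i (fib i)) (sm + fib i) (by omega) (by simp; omega)
      (by simp [List.getD_eq_getElem?_getD, hi])
      (by
        have : (i + 1) - 2 = i - 1 := by omega
        rw [this]
        have hne : i ≠ i - 1 := by omega
        rw [List.getD_eq_getElem?_getD, List.getElem?_set_ne hne,
          ← List.getD_eq_getElem?_getD, h1])]
    simp [sumFib]
    ring

theorem calculateSum_eq (i : Nat) : calculateSum (i : Int) = SFib i := by
  match i with
  | 0 => simp [calculateSum, SFib, sumFib]
  | 1 => norm_num [calculateSum, SFib, sumFib, fib]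
  | (m + 2) =>
    have h0 : ¬ ((m + 2 : Nat) : Int) ≤ 0 := by push_cast; omega
    have h1 : ((m + 2 : Nat) : Int) ≠ 1 := by push_cast; omega
    have htn : ((m + 2 : Nat) : Int).toNat = m + 2 := by omega
    rw [calculateSum, if_neg h0, if_neg h1]
    simp only [htn]
    set fibo := ((List.replicate (m + 2) (0 : Int)).set 0 1).set 1 1 with hfibo
    have hlen : fibo.length = m + 2 := by simp [hfibo]
    have hg1 : fibo.getD 1 0 = fib 1 := by
      rw [List.getD_eq_getElem?_getD, hfibo]
      rw [List.getElem?_set_self (by simp)]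
      simp [fib]
    have hg0 : fibo.getD 0 0 = fib 0 := by
      rw [List.getD_eq_getElem?_getD, hfibo]
      rw [List.getElem?_set_ne (by omega), List.getElem?_set_self (by simp)]
      simp [fib]
    have := csLoop_spec m 2 fibo (fibo.getD 0 0 + fibo.getD 1 0)
      (by omega) (by omega) (by simpa using hg1) (by simpa using hg0)
    simp only [show m + 2 - 2 = m from by omega]
    rw [this, hg0, hg1]
    simp [SFib, sumFib, fib]
    ring

theorem sumFib_succ_right : ∀ (k i : Nat), sumFib i (k + 1) = sumFib i k + fib (i + k) := by
  intro k
  induction k with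
  | zero => intro i; simp [sumFib]
  | succ k ih =>
    intro i
    rw [sumFib, ih, sumFib, show i + 1 + k = i + (k + 1) from by omega]
    ring

-- the B greedy loop, started after j+1 payments, agrees with A's loop tail
theorem greedy_inv (l : Int) : ∀ (k j : Nat),
    bGreedyLoop l k ((2 : Int) ^ (j + 1) - 1) ((2 : Int) ^ (j + 1)) ((j : Int) + 1)
      = aGreedy l (List.range' (j + 1) k) (j : Int) + 1 := by
  intro k
  induction k with
  | zero => intro j; simp [bGreedyLoop, aGreedy]
  | succ k ih =>
    intro j
    rw [List.range'_succ, bGreedyLoop, aGreedy]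
    have hc : (2 : Int) ^ (j + 1) - 1 + 2 ^ (j + 1) = 2 ^ (j + 1 + 1) - 1 := by
      rw [pow_succ]; ring
    by_cases h : (2 : Int) ^ (j + 1 + 1) - 1 ≤ l
    · rw [if_pos (by omega), if_pos h, hc]
      have e1 : (2 : Int) ^ (j + 1) * 2 = 2 ^ (j + 1 + 1) := by ring
      have e2 : ((j : Int) + 1) = ((j + 1 : Nat) : Int) := by push_cast; ring
      rw [e1, e2, ih (j + 1)]
    · rw [if_neg (by omega), if_neg h]

-- the B lucky loop, started after j payments, agrees with A's loop tail
theorem lucky_inv (l : Int) : ∀ (k j : Nat),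
    bLuckyLoop l k (SFib j) (fib j) (fib (j + 1)) (j : Int)
      = aLucky l (List.range' (j + 1) k) (j : Int) := by
  intro k
  induction k with
  | zero => intro j; simp [bLuckyLoop, aLucky]
  | succ k ih =>
    intro j
    rw [List.range'_succ, bLuckyLoop, aLucky, calculateSum_eq]
    have hS : SFib j + fib j = SFib (j + 1) := by
      simp only [SFib, sumFib_succ_right, zero_add]
    by_cases h : SFib (j + 1) ≤ l
    · rw [if_pos (by omega), if_pos h, hS,
        show fib j + fib (j + 1) = fib (j + 1 + 1) from by rw [fib]; ring,
        show ((j : Int) + 1) = ((j + 1 : Nat) : Int) from by push_cast; ring]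
      exact ih (j + 1)
    · rw [if_neg (by omega), if_neg h]

-- ===== VERDICT (by name: the statement is the Claim_ definition above) =====
theorem solution_spec : Claim_equal_solution := by
  unfold Claim_equal_solution Spec_solution
  intro l _
  unfold solution solution_alt
  by_cases hl : l = 0
  · simp [hl]
  rw [if_neg hl, if_neg hl]
  have hg := greedy_inv l 31 0
  have hlk := lucky_inv l 99 0
  norm_num [SFib, sumFib, fib] at hg hlk
  have h32 : List.range 32 = 0 :: List.range' 1 31 := by
    rw [List.range_eq_range', List.range'_succ]
  have h100 : List.range 100 = 0 :: List.range' 1 99 := by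
    rw [List.range_eq_range', List.range'_succ]
  rw [h32, h100, hg, hlk]
  simp only [aGreedy, aLucky]
  have hcs0 : calculateSum ((0 : Nat) : Int) = 0 := by norm_num [calculateSum]
  have hcs1 : calculateSum ((1 : Nat) : Int) = 1 := by norm_num [calculateSum]
  split_ifs with h2 h3 h3
  · push_cast; ring
  · exfalso; rw [hcs0] at h2; norm_num at h3; omega
  · exfalso; rw [hcs0] at h2; norm_num at h3; omega
  · -- l < 0: both inner loops also stop immediately
    rw [hcs0] at h2
    have hA1 : aGreedy l (List.range' 1 31) 0 = 0 := by
      rw [List.range'_succ]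
      simp only [aGreedy]
      rw [if_neg (by norm_num; omega)]
    have hA2 : aLucky l (List.range' 1 99) 0 = 0 := by
      rw [List.range'_succ]
      simp only [aLucky]
      rw [if_neg (by rw [hcs1]; omega)]
    rw [hA1, hA2]
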